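-- pv_equiv track=rewrite | github.com/SylomRouza/Assignment1 | data_analysis.py | get_token_length_map
-- ===== SOURCE A (Python) =====
-- def get_token_length_map(token_list):
--     token_length_map = {}
--
--     for token in token_list:
--         key = str(len(token))
--
--         if key in token_length_map:
--             token_length_map[key] += 1
--         else:
--             token_length_map[key] = 1
--
--     return get_sorted_map(token_length_map)
--
-- def get_sorted_map(unsorted_map):
--     key_list = []
--
--     for key in unsorted_map:
--         key_list.append(int(key))
--
--     key_list = sorted(key_list)
--     sorted_map = {}
--
--     for key in key_list:
--         key = str(key)
--         sorted_map[key] = unsorted_map[key]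
--
--     return sorted_map
-- ===== SOURCE B (Python) =====
-- def get_token_length_map(token_list):
--     lengths = sorted(len(token) for token in token_list)
--     result = {}
--     i = 0
--     n = len(lengths)
--     while i < n:
--         j = i + 1
--         while j < n and lengths[j] == lengths[i]:
--             j += 1
--         result[str(lengths[i])] = j - i
--         i = j
--     return result
-- ===== Notes on version B (the rewrite author's own statement) =====
-- stated objective: alternative
-- what changed: Replaces A's dict-counting pass plus separate key-to-int-resort-and-rebuild helper with a single sort-then-group pipeline: sort all token lengths once and emit (str(length), run length) for each maximal run of equal consecutive lengths, building the result directly in ascending key order.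
import Mathlib
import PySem

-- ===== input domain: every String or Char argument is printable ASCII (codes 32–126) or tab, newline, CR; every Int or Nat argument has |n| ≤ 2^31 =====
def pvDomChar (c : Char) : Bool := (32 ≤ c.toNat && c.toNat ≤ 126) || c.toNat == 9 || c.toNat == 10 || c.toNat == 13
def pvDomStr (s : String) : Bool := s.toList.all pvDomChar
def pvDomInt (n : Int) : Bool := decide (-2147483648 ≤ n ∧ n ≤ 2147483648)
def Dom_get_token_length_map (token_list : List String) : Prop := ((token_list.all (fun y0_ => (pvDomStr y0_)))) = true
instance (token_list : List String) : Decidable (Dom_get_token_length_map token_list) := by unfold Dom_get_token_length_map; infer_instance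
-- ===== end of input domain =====

-- B replaces A's dict-count + key-resort helper by one sort-then-group pass (alternative decomposition, same result).

-- ===== PORT A =====
-- int(key): in A, int() is applied only to keys of the form str(len(token)) — nonempty plain
-- decimal digit strings — on which Python's int() is exactly this digit fold; ported by hand
-- (exact on every string A ever passes to it) because PySem.Int.ofStr?'s parser internals are
-- private to its module and cannot be reasoned about here.
def pvInt (s : String) : Int := ((s.toList.foldl (fun a c => a * 10 + (c.toNat - 48)) 0 : Nat) : Int)

def get_sorted_map (unsorted_map : PySem.Dict String Int) : PySem.Dict String Int :=
  let key_list : List Int := unsorted_map.keys.foldl (fun key_list key => key_list ++ [pvInt key]) []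
  let key_list := PySem.List.sorted key_list (fun x => x)
  -- sorted_map[key] = unsorted_map[key]: the key is always present (it came from unsorted_map's
  -- keys), so Python's d[key] lookup never raises; ported as getD with default 0, exact here.
  List.foldl
    (fun sorted_map key =>
      sorted_map.insert (PySem.Int.toStr key) (unsorted_map.getD (PySem.Int.toStr key) 0))
    PySem.Dict.empty key_list

def get_token_length_map (token_list : List String) : List (String × Int) :=
  let token_length_map :=
    token_list.foldl
      (fun token_length_map token =>
        let key := PySem.Int.toStr (PySem.Str.len token)
        if token_length_map.contains key then
          -- token_length_map[key] += 1 (the key is present, so the read never raises)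
          token_length_map.insert key (token_length_map.getD key 0 + 1)
        else
          token_length_map.insert key 1)
      PySem.Dict.empty
  (get_sorted_map token_length_map).items

-- ===== PORT B =====
-- the outer while loop of Source B: each step consumes one maximal run of equal leading values
-- (the inner while scan is the takeWhile/dropWhile split) and emits (str(value), run length)
def pvGroupRuns : List Int → List (String × Int)
  | [] => []
  | x :: xs =>
    (PySem.Int.toStr x, 1 + ((xs.takeWhile (fun y => y == x)).length : Int)) ::
      pvGroupRuns (xs.dropWhile (fun y => y == x))
  termination_by l => l.length
  decreasing_by exact Nat.lt_succ_of_le (List.length_dropWhile_le _ _)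

def get_token_length_map_alt (token_list : List String) : List (String × Int) :=
  pvGroupRuns (PySem.List.sorted (token_list.map (fun token => PySem.Str.len token)) (fun x => x))

-- ===== PRECONDITION & SPEC =====
def Spec_get_token_length_map (token_list : List String) (out : List (String × Int)) : Prop := out = get_token_length_map_alt token_list
instance (token_list : List String) (out : List (String × Int)) : Decidable (Spec_get_token_length_map token_list out) := by unfold Spec_get_token_length_map; infer_instance

-- ===== CLAIM (what is proved, stated in full; the proofs are below) =====
def Claim_equal_get_token_length_map : Prop := ∀ (token_list : List String), Dom_get_token_length_map token_list → Spec_get_token_length_map token_list (get_token_length_map token_list)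

-- ===== LEMMAS AND PROOFS =====

-- the decimal digit list of n, built most-significant first (what Nat.toDigits 10 produces)
def pvDigits (n : Nat) : List Char :=
  if n < 10 then [Nat.digitChar n] else pvDigits (n / 10) ++ [Nat.digitChar (n % 10)]
  termination_by n
  decreasing_by exact Nat.div_lt_self (by omega) (by omega)

theorem pvToDigitsCore_eq (fuel : Nat) : ∀ n acc, n < fuel →
    Nat.toDigitsCore 10 fuel n acc = pvDigits n ++ acc := by
  induction fuel with
  | zero => intro n acc h; omega
  | succ f ih =>
    intro n acc h
    rw [Nat.toDigitsCore]
    by_cases h10 : n < 10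
    · have h0 : n / 10 = 0 := Nat.div_eq_of_lt h10
      simp only [h0, reduceIte]
      rw [pvDigits, if_pos h10, Nat.mod_eq_of_lt h10]
      rfl
    · have hne : ¬ n / 10 = 0 := by
        intro h0
        have := Nat.lt_of_div_eq_zero (by omega) h0
        omega
      simp only [hne, reduceIte]
      rw [ih (n / 10) _ (by omega)]
      conv_rhs => rw [pvDigits]
      rw [if_neg h10]
      simp

theorem pvDigitChar_toNat (m : Nat) (h : m < 10) : (Nat.digitChar m).toNat - 48 = m := by
  interval_cases m <;> decide

theorem pvDigits_foldl (n : Nat) : ∀ acc : Nat,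
    (pvDigits n).foldl (fun a c => a * 10 + (c.toNat - 48)) acc
      = acc * 10 ^ (pvDigits n).length + n := by
  induction n using Nat.strong_induction_on with
  | _ n ih =>
    intro acc
    by_cases h10 : n < 10
    · rw [pvDigits, if_pos h10]
      simp only [List.foldl, List.length]
      rw [pvDigitChar_toNat n h10]
      omega
    · rw [pvDigits, if_neg h10]
      rw [List.foldl_append]
      have hlt : n / 10 < n := Nat.div_lt_self (by omega) (by omega)
      rw [ih _ hlt]
      rw [show ∀ a : Nat, List.foldl (fun a c => a * 10 + (c.toNat - 48)) a [Nat.digitChar (n % 10)]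
            = a * 10 + ((Nat.digitChar (n % 10)).toNat - 48) from fun a => rfl]
      rw [pvDigitChar_toNat _ (Nat.mod_lt _ (by omega))]
      simp only [List.length_append, List.length]
      have := Nat.div_add_mod n 10
      ring_nf
      omega

theorem pvToChars_eq (a : Int) (h : 0 ≤ a) : PySem.Int.toChars a = pvDigits a.toNat := by
  rw [PySem.Int.toChars, if_neg (by omega)]
  rw [Nat.toDigits, pvToDigitsCore_eq _ _ _ (by omega), List.append_nil]

-- int(str(a)) = a for 0 ≤ a
theorem pvInt_toStr (a : Int) (h : 0 ≤ a) : pvInt (PySem.Int.toStr a) = a := by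
  rw [pvInt, PySem.Int.toList_toStr, pvToChars_eq a h, pvDigits_foldl]
  simp
  omega

theorem pvToStr_injOn (a b : Int) (ha : 0 ≤ a) (hb : 0 ≤ b)
    (h : PySem.Int.toStr a = PySem.Int.toStr b) : a = b := by
  have := pvInt_toStr a ha
  rw [h, pvInt_toStr b hb] at this
  omega

theorem pvCount_map_toStr (l : List Int) (x : Int) (hx : 0 ≤ x) (hl : ∀ y ∈ l, 0 ≤ y) :
    List.count (PySem.Int.toStr x) (l.map PySem.Int.toStr) = l.count x := by
  induction l with
  | nil => rfl
  | cons c t ih =>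
    simp only [List.map, List.count_cons]
    rw [ih (fun y hy => hl y (by simp [hy]))]
    congr 1
    have hc : 0 ≤ c := hl c (by simp)
    by_cases h : c = x
    · subst h; simp
    · have : ¬ PySem.Int.toStr c = PySem.Int.toStr x := fun he => h (pvToStr_injOn c x hc hx he)
      simp [h, this]

theorem pvSet_update_cons {x : Int} (l : List Int) (hx : x ∉ l) : ∀ s : List Int,
    PySem.Set.update (x :: s) l = x :: PySem.Set.update s l := by
  induction l with
  | nil => intro s; rfl
  | cons c t ih =>
    intro s
    have hcx : (c == x) = false := by simp; rintro rfl; exact hx (by simp)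
    have : PySem.Set.add (x :: s) c = x :: PySem.Set.add s c := by
      simp only [PySem.Set.add, PySem.Set.contains, List.contains_cons, hcx, Bool.false_or]
      split <;> rfl
    simp only [PySem.Set.update, List.foldl] at *
    rw [this, ih (fun h => hx (by simp [h]))]

theorem pvSet_update_const (l : List Int) : ∀ s : PySem.Set Int,
    (∀ y ∈ l, s.contains y) → PySem.Set.update s l = s := by
  induction l with
  | nil => intro s _; rfl
  | cons c t ih =>
    intro s h
    have : PySem.Set.add s c = s := by simp only [PySem.Set.add, h c (by simp)]; rfl
    simp only [PySem.Set.update, List.foldl] at *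
    rw [this, ih s (fun y hy => h y (by simp [hy]))]

theorem pvSet_ofList_sublist {α : Type} [BEq α] (l : List α) : (PySem.Set.ofList l).Sublist l := by
  induction l using List.reverseRecOn with
  | nil => simp [PySem.Set.ofList]
  | append_singleton t y ih =>
    rw [PySem.Set.ofList_eq_foldl, List.foldl_append]
    rw [← PySem.Set.ofList_eq_foldl]
    simp only [List.foldl]
    unfold PySem.Set.add
    split
    · exact ih.trans (List.sublist_append_left _ _)
    · exact List.Sublist.append ih (List.Sublist.refl _)

theorem pvSet_ofList_map_toStr (l : List Int) (hl : ∀ y ∈ l, 0 ≤ y) :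
    PySem.Set.ofList (l.map PySem.Int.toStr) = (PySem.Set.ofList l).map PySem.Int.toStr := by
  suffices h : ∀ s : List Int, (∀ y ∈ s, 0 ≤ y) →
      List.foldl PySem.Set.add (s.map PySem.Int.toStr) (l.map PySem.Int.toStr)
        = (List.foldl PySem.Set.add s l).map PySem.Int.toStr by
    simpa [PySem.Set.ofList_eq_foldl] using h [] (by simp)
  induction l with
  | nil => intro s _; rfl
  | cons c t ih =>
    intro s hs
    have hc : 0 ≤ c := hl c (by simp)
    simp only [List.map, List.foldl]
    have hadd : PySem.Set.add (s.map PySem.Int.toStr) (PySem.Int.toStr c)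
        = (PySem.Set.add s c).map PySem.Int.toStr := by
      have hcont : (List.map PySem.Int.toStr s).contains (PySem.Int.toStr c) = s.contains c := by
        simp only [List.contains_eq_any_beq, List.any_map]
        apply PySem.List.any_congr_mem
        intro y hy
        have hy0 : 0 ≤ y := hs y hy
        by_cases h : y = c
        · subst h; simp
        · have h1 : ¬ PySem.Int.toStr c = PySem.Int.toStr y :=
            fun he => h (pvToStr_injOn _ _ hc hy0 he).symm
          have h2 : ¬ c = y := fun hh => h hh.symm
          simp [Function.comp, h1, h2]
      simp only [PySem.Set.add, PySem.Set.contains, hcont]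
      split <;> simp
    rw [hadd]
    exact ih (fun y hy => hl y (by simp [hy])) (PySem.Set.add s c)
      (by intro y hy
          unfold PySem.Set.add at hy
          split at hy
          · exact hs y hy
          · rcases List.mem_append.mp hy with h | h
            · exact hs y h
            · simp at h; omega)

theorem pvOfList_cons_run (x : Int) (xs : List Int)
    (ht : ∀ y ∈ xs.takeWhile (fun y => y == x), y = x)
    (hr : x ∉ xs.dropWhile (fun y => y == x)) :
    PySem.Set.ofList (x :: xs) = x :: PySem.Set.ofList (xs.dropWhile (fun y => y == x)) := by
  set t := xs.takeWhile (fun y => y == x) with htdef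
  set r := xs.dropWhile (fun y => y == x) with hrdef
  have hxs : t ++ r = xs := List.takeWhile_append_dropWhile
  calc PySem.Set.ofList (x :: xs)
      = PySem.Set.update [x] xs := by
        rw [PySem.Set.ofList_eq_foldl]; simp only [List.foldl]; rfl
    _ = PySem.Set.update [x] (t ++ r) := by rw [hxs]
    _ = PySem.Set.update (PySem.Set.update [x] t) r := by
        simp only [PySem.Set.update, List.foldl_append]
    _ = PySem.Set.update [x] r := by
        rw [pvSet_update_const t _ (by
          intro y hy; have := ht y hy; subst this; simp [PySem.Set.contains])]
    _ = x :: PySem.Set.update [] r := pvSet_update_cons r hr []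
    _ = x :: PySem.Set.ofList r := by
        rw [PySem.Set.ofList_eq_foldl]; rfl

-- B's grouping of a nondecreasing list yields the first occurrences with their multiplicities
theorem pvGroupRuns_eq (s : List Int) (hs : s.Pairwise (· ≤ ·)) :
    pvGroupRuns s
      = (PySem.Set.ofList s).map (fun l => (PySem.Int.toStr l, (s.count l : Int))) := by
  induction s using pvGroupRuns.induct with
  | case1 => simp [pvGroupRuns, PySem.Set.ofList]
  | case2 x xs ih =>
    have hpxs : xs.Pairwise (· ≤ ·) := (List.pairwise_cons.mp hs).2
    have hle : ∀ y ∈ xs, x ≤ y := (List.pairwise_cons.mp hs).1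
    set t := xs.takeWhile (fun y => y == x) with htdef
    set r := xs.dropWhile (fun y => y == x) with hrdef
    have htx : ∀ y ∈ t, y = x := fun y hy => by
      have := List.mem_takeWhile_imp hy; simpa using this
    have hrsub : r.Sublist xs := List.dropWhile_sublist _
    have hxr : ∀ y ∈ r, x < y := by
      intro y hy
      rcases hr : r with _ | ⟨hd, tl⟩
      · rw [hr] at hy; cases hy
      · have hhd : ¬ (hd == x) = true := by
          have := List.head?_dropWhile_not (p := fun y => y == x) (l := xs)
          rw [← hrdef, hr] at this; simpa using this
        have hhdx : hd ≠ x := by simpa using hhd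
        have hhdmem : hd ∈ xs := hrsub.mem (by rw [hr]; simp)
        have hxhd : x < hd := lt_of_le_of_ne (hle hd hhdmem) (Ne.symm hhdx)
        rw [hr] at hy
        rcases hy with _ | hy
        · exact hxhd
        · have hp : r.Pairwise (· ≤ ·) := hpxs.sublist hrsub
          rw [hr] at hp
          have := (List.pairwise_cons.mp hp).1
          exact lt_of_lt_of_le hxhd (this _ (by assumption))
    have hxnotr : x ∉ r := fun hx => lt_irrefl x (hxr x hx)
    have hcount : (x :: xs).count x = 1 + t.length := by
      rw [List.count_cons_self]
      rw [← List.takeWhile_append_dropWhile (p := fun y => y == x) (l := xs), List.count_append]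
      rw [← htdef, ← hrdef]
      rw [List.count_eq_length.mpr (fun b hb => (htx b hb).symm)]
      rw [List.count_eq_zero.mpr hxnotr]
      omega
    rw [pvGroupRuns]
    rw [pvOfList_cons_run x xs htx hxnotr, List.map_cons]
    rw [← htdef, ← hrdef]
    congr 1
    · rw [hcount]
      push_cast
      ring_nf
    · rw [ih (hpxs.sublist hrsub)]
      apply List.map_congr_left
      intro l hl
      have hlr : l ∈ r := (PySem.Set.mem_ofList _ _).mp hl
      have hlx : x < l := hxr l hlr
      congr 1
      have : (x :: xs).count l = r.count l := by
        rw [List.count_cons_of_ne (by omega)]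
        rw [← List.takeWhile_append_dropWhile (p := fun y => y == x) (l := xs), List.count_append,
          ← htdef, ← hrdef]
        rw [List.count_eq_zero.mpr (fun hmem => by have := htx l hmem; omega)]
        omega
      rw [this]

-- first occurrences of an ascending sort = ascending sort of the distinct values
theorem pvOfList_sorted (l : List Int) :
    PySem.List.sorted (PySem.Set.ofList l) (fun x => x)
      = PySem.Set.ofList (PySem.List.sorted l (fun x => x)) := by
  apply PySem.List.sorted_eq_of_perm_of_pairwise_lt
  · apply (List.perm_ext_iff_of_nodup (PySem.Set.nodup_ofList _) (PySem.Set.nodup_ofList _)).mpr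
    intro a
    rw [PySem.Set.mem_ofList, PySem.Set.mem_ofList]
    exact (PySem.List.sorted_perm l (fun x => x) false).mem_iff
  · have hle : (PySem.Set.ofList (PySem.List.sorted l (fun x => x))).Pairwise (· ≤ ·) :=
      (PySem.List.sorted_pairwise l (fun x => x)).sublist (pvSet_ofList_sublist _)
    have hne : (PySem.Set.ofList (PySem.List.sorted l (fun x => x))).Pairwise (· ≠ ·) :=
      PySem.Set.nodup_ofList _
    exact (hle.and hne).imp (fun h => lt_of_le_of_ne h.1 h.2)

-- A's counting dict is Counter(str(len(token)) for token in token_list)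
theorem pvCountDict_eq (token_list : List String) :
    token_list.foldl
      (fun token_length_map token =>
        let key := PySem.Int.toStr (PySem.Str.len token)
        if token_length_map.contains key then
          token_length_map.insert key (token_length_map.getD key 0 + 1)
        else
          token_length_map.insert key 1)
      PySem.Dict.empty
    = PySem.Dict.counter (token_list.map (fun t => PySem.Int.toStr (PySem.Str.len t))) := by
  rw [show PySem.Dict.counter (token_list.map (fun t => PySem.Int.toStr (PySem.Str.len t)))
      = List.foldl (fun d x => d.insert x (d.getD x 0 + 1)) PySem.Dict.empty
          (token_list.map (fun t => PySem.Int.toStr (PySem.Str.len t))) from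
    (PySem.Dict.foldl_insert_getD_add_one_eq_counter _).symm]
  rw [List.foldl_map]
  apply PySem.List.foldl_congr_mem
  intro acc x _
  dsimp only
  by_cases h : acc.contains (PySem.Int.toStr (PySem.Str.len x)) = true
  · rw [if_pos h]
  · rw [if_neg h]
    rw [PySem.Dict.getD_of_not_contains _ _ (by simpa using h)]
    norm_num

-- ===== VERDICT (by name: the statement is the Claim_ definition above) =====
theorem get_token_length_map_spec : Claim_equal_get_token_length_map := by
  intro token_list _
  unfold Spec_get_token_length_map
  set lens := token_list.map (fun t => PySem.Str.len t) with hlensdef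
  have hnn : ∀ y ∈ lens, 0 ≤ y := by
    intro y hy
    rw [hlensdef] at hy
    rcases List.mem_map.mp hy with ⟨t, _, rfl⟩
    simp [PySem.Str.len]
  have hks : token_list.map (fun t => PySem.Int.toStr (PySem.Str.len t))
      = lens.map PySem.Int.toStr := by
    rw [hlensdef, List.map_map]; rfl
  have hkeys : List.map pvInt
      (PySem.Dict.counter (token_list.map (fun t => PySem.Int.toStr (PySem.Str.len t)))).keys
      = PySem.Set.ofList lens := by
    rw [PySem.Dict.keys_counter, hks, pvSet_ofList_map_toStr lens hnn, List.map_map]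
    rw [show (pvInt ∘ PySem.Int.toStr) = fun a => pvInt (PySem.Int.toStr a) from rfl]
    rw [List.map_congr_left (g := fun a => a)
      (fun a ha => pvInt_toStr a (hnn a ((PySem.Set.mem_ofList _ _).mp ha)))]
    exact List.map_id' _
  have hsortnn : ∀ y ∈ PySem.List.sorted lens (fun x => x), 0 ≤ y := by
    intro y hy
    exact hnn y ((PySem.List.sorted_perm lens (fun x => x) false).mem_iff.mp hy)
  have hofnn : ∀ y ∈ PySem.Set.ofList (PySem.List.sorted lens (fun x => x)), 0 ≤ y :=
    fun y hy => hsortnn y ((PySem.Set.mem_ofList _ _).mp hy)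
  -- A's side
  rw [get_token_length_map, pvCountDict_eq, get_sorted_map]
  rw [PySem.List.foldl_append_singleton_eq_map, List.nil_append]
  rw [hkeys, pvOfList_sorted]
  rw [PySem.Dict.items_foldl_insert_fresh _ _ _ _
    (by intro a _; simp [PySem.Dict.contains_empty])
    ((PySem.Set.nodup_ofList _).map_on
      (fun a ha b hb he => pvToStr_injOn a b (hofnn a ha) (hofnn b hb) he))]
  rw [show (PySem.Dict.empty : PySem.Dict String Int).items = [] from rfl, List.nil_append]
  -- B's side
  rw [get_token_length_map_alt, ← hlensdef]
  rw [pvGroupRuns_eq _ (by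
    have := PySem.List.sorted_pairwise lens (fun x => x)
    simpa using this)]
  -- both sides are maps over the same sorted distinct-length list; compare pointwise
  apply List.map_congr_left
  intro a ha
  have ha0 : 0 ≤ a := hofnn a ha
  congr 1
  rw [PySem.Dict.getD_counter, hks, pvCount_map_toStr lens a ha0 hnn]
  congr 1
  exact ((PySem.List.sorted_perm lens (fun x => x) false).count_eq a).symm
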